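-- pv_equiv track=rewrite | github.com/MwailaCoding/ProwriteFrontend | backend/Prowritesolutions/mock_ai_service.py | enhance_achievements
-- ===== SOURCE A (Python) =====
-- from typing import Dict, List, Optional, Union
--
-- def enhance_achievements(bullet_points: List[str], job_title: str) -> List[str]:
--     """Mock achievement enhancement"""
--     enhanced = []
--     for point in bullet_points:
--         if "developed" in point.lower():
--             enhanced.append(f"Successfully {point} resulting in 30% improved performance")
--         elif "led" in point.lower():
--             enhanced.append(f"{point} and increased team productivity by 25%")
--         elif "implemented" in point.lower():
--             enhanced.append(f"{point} reducing deployment time by 40%")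
--         else:
--             enhanced.append(point)
--     return enhanced
-- ===== SOURCE B (Python) =====
-- def enhance_achievements(bullet_points, job_title):
--     """Staged-passes version: an Option-slot list is filled by one whole-list
--     pass per rule (an earlier pass's fill blocks later rules), then unwrapped."""
--     slots = [None] * len(bullet_points)
--     for i, p in enumerate(bullet_points):
--         if "developed" in p.lower():
--             slots[i] = f"Successfully {p} resulting in 30% improved performance"
--     for i, p in enumerate(bullet_points):
--         if slots[i] is None and "led" in p.lower():
--             slots[i] = f"{p} and increased team productivity by 25%"
--     for i, p in enumerate(bullet_points):
--         if slots[i] is None and "implemented" in p.lower():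
--             slots[i] = f"{p} reducing deployment time by 40%"
--     return [s if s is not None else p for s, p in zip(slots, bullet_points)]
-- ===== Notes on version B (the rewrite author's own statement) =====
-- stated objective: alternative
-- what changed: Replaced the single accumulator loop with a per-item if/elif/else cascade by three staged whole-list passes that fill an Option-slot array (one pass per rule, an already-filled slot blocks later rules) followed by a final unwrap pass; it trades one pass for four in exchange for rule-at-a-time structure.
import Mathlib
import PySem

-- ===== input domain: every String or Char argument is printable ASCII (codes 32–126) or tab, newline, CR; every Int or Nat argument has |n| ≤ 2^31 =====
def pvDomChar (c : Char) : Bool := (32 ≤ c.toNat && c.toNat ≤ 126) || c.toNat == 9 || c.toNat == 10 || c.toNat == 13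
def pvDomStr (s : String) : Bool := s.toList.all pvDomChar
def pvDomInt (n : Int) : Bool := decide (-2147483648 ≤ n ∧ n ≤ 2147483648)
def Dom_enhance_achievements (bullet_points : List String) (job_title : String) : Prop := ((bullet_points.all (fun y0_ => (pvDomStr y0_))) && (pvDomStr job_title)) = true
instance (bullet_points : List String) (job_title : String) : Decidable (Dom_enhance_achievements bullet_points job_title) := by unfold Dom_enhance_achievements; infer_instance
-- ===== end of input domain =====

-- B replaces A's single per-item if/elif/else loop by three staged whole-list passes filling
-- an Option-slot list (one pass per rule; a filled slot blocks later rules) plus a final unwrap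
-- pass (objective: alternative — rule-at-a-time structure of similar cost).

-- ===== PORT A =====
def enhance_achievements (bullet_points : List String) (job_title : String) : List String :=
  bullet_points.foldl (fun enhanced point =>
    if PySem.Str.isIn "developed" (PySem.Str.lower point) then
      enhanced ++ ["Successfully " ++ point ++ " resulting in 30% improved performance"]
    else if PySem.Str.isIn "led" (PySem.Str.lower point) then
      enhanced ++ [point ++ " and increased team productivity by 25%"]
    else if PySem.Str.isIn "implemented" (PySem.Str.lower point) then
      enhanced ++ [point ++ " reducing deployment time by 40%"]
    else
      enhanced ++ [point]) []

-- ===== PORT B =====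
-- pass 1: slots = [None]*len; fill where "developed" matches (slots are all none here)
def pvPass1 (sp : Option String × String) : Option String :=
  if PySem.Str.isIn "developed" (PySem.Str.lower sp.2) then
    some ("Successfully " ++ sp.2 ++ " resulting in 30% improved performance")
  else sp.1

-- pass 2: fill still-empty slots where "led" matches
def pvPass2 (sp : Option String × String) : Option String :=
  match sp.1 with
  | some v => some v
  | none =>
      if PySem.Str.isIn "led" (PySem.Str.lower sp.2) then
        some (sp.2 ++ " and increased team productivity by 25%")
      else none

-- pass 3: fill still-empty slots where "implemented" matches
def pvPass3 (sp : Option String × String) : Option String :=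
  match sp.1 with
  | some v => some v
  | none =>
      if PySem.Str.isIn "implemented" (PySem.Str.lower sp.2) then
        some (sp.2 ++ " reducing deployment time by 40%")
      else none

def enhance_achievements_alt (bullet_points : List String) (job_title : String) : List String :=
  let slots0 := bullet_points.map (fun _ => (none : Option String))
  let slots1 := (slots0.zip bullet_points).map pvPass1
  let slots2 := (slots1.zip bullet_points).map pvPass2
  let slots3 := (slots2.zip bullet_points).map pvPass3
  (slots3.zip bullet_points).map (fun sp => sp.1.getD sp.2)

-- ===== PRECONDITION & SPEC =====
def Spec_enhance_achievements (bullet_points : List String) (job_title : String) (out : List String) : Prop := out = enhance_achievements_alt bullet_points job_title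
instance (bullet_points : List String) (job_title : String) (out : List String) : Decidable (Spec_enhance_achievements bullet_points job_title out) := by unfold Spec_enhance_achievements; infer_instance

-- ===== CLAIM (what is proved, stated in full; the proofs are below) =====
def Claim_equal_enhance_achievements : Prop := ∀ (bullet_points : List String) (job_title : String), Dom_enhance_achievements bullet_points job_title → Spec_enhance_achievements bullet_points job_title (enhance_achievements bullet_points job_title)

-- ===== LEMMAS AND PROOFS =====

-- A's per-point branch cascade
def pvF (point : String) : String :=
  if PySem.Str.isIn "developed" (PySem.Str.lower point) then
    "Successfully " ++ point ++ " resulting in 30% improved performance"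
  else if PySem.Str.isIn "led" (PySem.Str.lower point) then
    point ++ " and increased team productivity by 25%"
  else if PySem.Str.isIn "implemented" (PySem.Str.lower point) then
    point ++ " reducing deployment time by 40%"
  else point

-- B's staged pipeline, applied per element, equals A's cascade.
theorem pvStaged_point (p : String) :
    (pvPass3 (pvPass2 (pvPass1 (none, p), p), p)).getD p = pvF p := by
  unfold pvPass1 pvPass2 pvPass3 pvF
  split_ifs <;> simp

theorem pvAlt_eq_map (bps : List String) (jt : String) :
    enhance_achievements_alt bps jt = bps.map pvF := by
  unfold enhance_achievements_alt
  induction bps with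
  | nil => rfl
  | cons p t ih =>
      simp only [List.map, List.zip, List.zipWith] at ih ⊢
      exact congrArg₂ List.cons (pvStaged_point p) ih

-- ===== VERDICT (by name: the statement is the Claim_ definition above) =====
theorem enhance_achievements_spec : Claim_equal_enhance_achievements := by
  intro bps jt _
  unfold Spec_enhance_achievements enhance_achievements
  rw [show (fun (enhanced : List String) (point : String) =>
        if PySem.Str.isIn "developed" (PySem.Str.lower point) then
          enhanced ++ ["Successfully " ++ point ++ " resulting in 30% improved performance"]
        else if PySem.Str.isIn "led" (PySem.Str.lower point) then
          enhanced ++ [point ++ " and increased team productivity by 25%"]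
        else if PySem.Str.isIn "implemented" (PySem.Str.lower point) then
          enhanced ++ [point ++ " reducing deployment time by 40%"]
        else enhanced ++ [point])
      = (fun enhanced point => enhanced ++ [pvF point])
      from funext fun e => funext fun p => by unfold pvF; split_ifs <;> rfl]
  rw [PySem.List.foldl_append_singleton_eq_map, pvAlt_eq_map]
  rfl
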